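-- pv_equiv track=rewrite | github.com/deeyajkotecha-del/helix-biotech | backend/services/ir_scraper.py | extract_drug_mentions
-- ===== SOURCE A (Python) =====
-- from typing import List, Optional
--
-- def extract_drug_mentions(news_items: List[dict], drug_names: List[str]) -> dict:
--     """
--     Extract which drugs are mentioned in news items.
--
--     Args:
--         news_items: List of news items
--         drug_names: List of drug names to look for
--
--     Returns:
--         dict mapping drug names to relevant news items
--     """
--     drug_news = {drug: [] for drug in drug_names}
--
--     for item in news_items:
--         title_lower = item.get("title", "").lower()
--         for drug in drug_names:
--             drug_lower = drug.lower()
--             # Check for drug name or common variations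
--             if drug_lower in title_lower or drug_lower.replace("-", "") in title_lower:
--                 drug_news[drug].append(item)
--
--     return drug_news
-- ===== SOURCE B (Python) =====
-- def extract_drug_mentions(news_items, drug_names):
--     # Build an inverted index: pattern -> increasing list of drug indices.
--     pat2idxs = {}
--     for idx, drug in enumerate(drug_names):
--         dl = drug.lower()
--         for p in (dl, dl.replace("-", "")):
--             lst = pat2idxs.get(p, [])
--             if idx not in lst:
--                 pat2idxs[p] = lst + [idx]
--     lengths = sorted({len(p) for p in pat2idxs})
--     result = {drug: [] for drug in drug_names}
--     for item in news_items:
--         t = item.get("title", "").lower()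
--         n = len(t)
--         matched = set()
--         for L in lengths:
--             for i in range(n - L + 1):
--                 for idx in pat2idxs.get(t[i:i + L], []):
--                     matched.add(idx)
--         for idx in sorted(matched):
--             result[drug_names[idx]].append(item)
--     return result
-- ===== Notes on version B (the rewrite author's own statement) =====
-- stated objective: alternative
-- what changed: B replaces A's per-item inner loop over every drug name by multi-pattern matching: it builds an inverted index mapping each lowercased/hyphen-stripped pattern to the drug indices using it, then for each title scans its windows (one pass per distinct pattern length) with dictionary lookups and appends the matched drugs in index order, so no per-drug substring test is performed; intended as a speed-up for many drug names (per-title work independent of M), measured 5-6x at n=65536 but not confirmed at every size.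
import Mathlib
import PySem

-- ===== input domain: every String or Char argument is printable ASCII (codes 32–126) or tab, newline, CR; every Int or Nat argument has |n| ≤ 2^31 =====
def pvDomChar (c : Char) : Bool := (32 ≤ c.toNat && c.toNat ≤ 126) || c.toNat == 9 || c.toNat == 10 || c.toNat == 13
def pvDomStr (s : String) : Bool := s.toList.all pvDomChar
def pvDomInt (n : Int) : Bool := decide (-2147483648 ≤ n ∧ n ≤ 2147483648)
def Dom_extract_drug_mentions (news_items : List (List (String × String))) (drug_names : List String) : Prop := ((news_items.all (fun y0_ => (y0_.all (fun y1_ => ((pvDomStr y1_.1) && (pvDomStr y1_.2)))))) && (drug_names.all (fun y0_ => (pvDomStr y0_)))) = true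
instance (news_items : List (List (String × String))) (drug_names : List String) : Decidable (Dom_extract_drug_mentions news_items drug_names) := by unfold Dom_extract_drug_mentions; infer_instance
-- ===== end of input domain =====

-- B replaces A's per-item scan over all drug names by multi-pattern matching: an inverted
-- index pattern -> drug indices built once, then one window scan per title per distinct
-- pattern length, so the per-drug inner loop disappears. Equivalence is about the return value.

-- ===== PORT A =====
def extract_drug_mentions (news_items : List (List (String × String))) (drug_names : List String) : List (String × List (List (String × String))) :=
  -- drug_news = {drug: [] for drug in drug_names}
  let init : PySem.Dict String (List (List (String × String))) :=
    drug_names.foldl (fun d drug => d.insert drug []) PySem.Dict.empty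
  let final := news_items.foldl (fun drug_news item =>
    let title_lower := PySem.Str.lower (PySem.Dict.getD (PySem.Dict.mk item) "title" "")
    drug_names.foldl (fun dn drug =>
      let drug_lower := PySem.Str.lower drug
      if PySem.Str.isIn drug_lower title_lower || PySem.Str.isIn (PySem.Str.replace drug_lower "-" "") title_lower
      then dn.modify drug [] (fun l => l ++ [item])   -- drug_news[drug].append(item): the key is always present
      else dn) drug_news) init
  final.items

-- ===== PORT B =====
def extract_drug_mentions_alt (news_items : List (List (String × String))) (drug_names : List String) : List (String × List (List (String × String))) :=
  -- pat2idxs: pattern -> increasing list of drug indices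
  let pat2idxs : PySem.Dict String (List Int) :=
    (PySem.List.enumerate drug_names 0).foldl (fun d e =>
      let dl := PySem.Str.lower e.2
      [dl, PySem.Str.replace dl "-" ""].foldl (fun d p =>
        let lst := d.getD p []
        if e.1 ∈ lst then d else d.insert p (lst ++ [e.1])) d) PySem.Dict.empty
  -- lengths = sorted({len(p) for p in pat2idxs})
  let lengths : List Int :=
    PySem.List.sorted (PySem.Set.ofList (pat2idxs.keys.map PySem.Str.len)) (fun x => x) false
  let result :=
    news_items.foldl (fun r item =>
      let t := PySem.Str.lower (PySem.Dict.getD (PySem.Dict.mk item) "title" "")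
      let n := PySem.Str.len t
      let matched : PySem.Set Int :=
        lengths.foldl (fun m L =>
          (PySem.List.pyRange 0 (n - L + 1) 1).foldl (fun m i =>
            (pat2idxs.getD (PySem.Str.slice t (some i) (some (i + L))) []).foldl
              (fun m idx => PySem.Set.add m idx) m) m) PySem.Set.empty
      (PySem.List.sorted matched (fun x => x) false).foldl
        (fun r idx => r.modify (PySem.List.pyGetD drug_names idx "") [] (fun l => l ++ [item])) r)
      (drug_names.foldl (fun r drug => r.insert drug []) PySem.Dict.empty)
  result.items

-- ===== PRECONDITION & SPEC =====
def Spec_extract_drug_mentions (news_items : List (List (String × String))) (drug_names : List String) (out : List (String × List (List (String × String)))) : Prop := out = extract_drug_mentions_alt news_items drug_names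
instance (news_items : List (List (String × String))) (drug_names : List String) (out : List (String × List (List (String × String)))) : Decidable (Spec_extract_drug_mentions news_items drug_names out) := by unfold Spec_extract_drug_mentions; infer_instance

-- ===== CLAIM (what is proved, stated in full; the proofs are below) =====
def Claim_equal_extract_drug_mentions : Prop := ∀ (news_items : List (List (String × String))) (drug_names : List String), Dom_extract_drug_mentions news_items drug_names → Spec_extract_drug_mentions news_items drug_names (extract_drug_mentions news_items drug_names)

-- ===== LEMMAS AND PROOFS =====

-- the common match test and the lowered title
def pvMatch (g t : String) : Bool :=
  PySem.Str.isIn (PySem.Str.lower g) t || PySem.Str.isIn (PySem.Str.replace (PySem.Str.lower g) "-" "") t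

def pvTL (item : List (String × String)) : String :=
  PySem.Str.lower (PySem.Dict.getD (PySem.Dict.mk item) "title" "")

-- B's index-building loop body, named for the proofs (defeq to the port's inline lambda)
def pvIns (idx : Int) (d : PySem.Dict String (List Int)) (p : String) : PySem.Dict String (List Int) :=
  let lst := d.getD p []
  if idx ∈ lst then d else d.insert p (lst ++ [idx])

def pvStepD (d : PySem.Dict String (List Int)) (e : Int × String) : PySem.Dict String (List Int) :=
  [PySem.Str.lower e.2, PySem.Str.replace (PySem.Str.lower e.2) "-" ""].foldl (pvIns e.1) d

def pvDict (drugs : List String) : PySem.Dict String (List Int) :=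
  (PySem.List.enumerate drugs 0).foldl pvStepD PySem.Dict.empty

def pvLens (drugs : List String) : List Int :=
  PySem.List.sorted (PySem.Set.ofList ((pvDict drugs).keys.map PySem.Str.len)) (fun x => x) false

def pvMatched (drugs : List String) (t : String) : PySem.Set Int :=
  (pvLens drugs).foldl (fun m L =>
    (PySem.List.pyRange 0 (PySem.Str.len t - L + 1) 1).foldl (fun m i =>
      ((pvDict drugs).getD (PySem.Str.slice t (some i) (some (i + L))) []).foldl
        (fun m idx => PySem.Set.add m idx) m) m) PySem.Set.empty

-- generic: membership through a fold whose step adds elements described by Q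
lemma pv_mem_foldl {β : Type} (f : PySem.Set Int → β → PySem.Set Int) (Q : β → Int → Prop)
    (hf : ∀ s b x, x ∈ f s b ↔ x ∈ s ∨ Q b x) (l : List β) (s : PySem.Set Int) (x : Int) :
    x ∈ l.foldl f s ↔ x ∈ s ∨ ∃ b ∈ l, Q b x := by
  induction l generalizing s with
  | nil => simp
  | cons b l ih =>
    rw [List.foldl_cons, ih, hf]
    constructor
    · rintro ((h | h) | ⟨c, hc, hQ⟩)
      · exact Or.inl h
      · exact Or.inr ⟨b, by simp, h⟩
      · exact Or.inr ⟨c, by simp [hc], hQ⟩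
    · rintro (h | ⟨c, hc, hQ⟩)
      · exact Or.inl (Or.inl h)
      · rcases List.mem_cons.mp hc with rfl | hc
        · exact Or.inl (Or.inr hQ)
        · exact Or.inr ⟨c, hc, hQ⟩

-- generic: a fold whose step preserves Nodup preserves Nodup
lemma pv_nodup_foldl {β : Type} (f : PySem.Set Int → β → PySem.Set Int)
    (hf : ∀ s b, s.Nodup → (f s b).Nodup) (l : List β) :
    ∀ s : PySem.Set Int, s.Nodup → (l.foldl f s).Nodup := by
  induction l with
  | nil => exact fun s h => h
  | cons b l ih => exact fun s h => ih _ (hf s b h)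

lemma pvIns_mem (idx : Int) (d : PySem.Dict String (List Int)) (p q : String) (x : Int) :
    x ∈ (pvIns idx d p).getD q [] ↔ x ∈ d.getD q [] ∨ (x = idx ∧ q = p) := by
  unfold pvIns
  by_cases hm : idx ∈ d.getD p []
  · simp only [hm, if_true]
    constructor
    · exact Or.inl
    · rintro (h | ⟨rfl, rfl⟩)
      · exact h
      · exact hm
  · simp only [hm, if_false]
    by_cases hq : q = p
    · subst hq
      rw [PySem.Dict.getD_insert_self d q (d.getD q [] ++ [idx]) []]
      simp
    · rw [PySem.Dict.getD_insert_of_ne d (d.getD p [] ++ [idx]) [] hq]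
      simp [hq]

lemma pvStepD_mem (d : PySem.Dict String (List Int)) (e : Int × String) (q : String) (x : Int) :
    x ∈ (pvStepD d e).getD q [] ↔ x ∈ d.getD q [] ∨
      (x = e.1 ∧ (q = PySem.Str.lower e.2 ∨ q = PySem.Str.replace (PySem.Str.lower e.2) "-" "")) := by
  unfold pvStepD
  rw [List.foldl_cons, List.foldl_cons, List.foldl_nil, pvIns_mem, pvIns_mem, or_assoc, and_or_left]


lemma pvDict_mem_aux (es : List (Int × String)) (d : PySem.Dict String (List Int)) (q : String) (x : Int) :
    x ∈ (es.foldl pvStepD d).getD q [] ↔ x ∈ d.getD q [] ∨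
      ∃ e ∈ es, x = e.1 ∧ (q = PySem.Str.lower e.2 ∨ q = PySem.Str.replace (PySem.Str.lower e.2) "-" "") := by
  induction es generalizing d with
  | nil => simp
  | cons e es ih =>
    rw [List.foldl_cons, ih, pvStepD_mem]
    constructor
    · rintro ((h | h) | ⟨c, hc, hx⟩)
      · exact Or.inl h
      · exact Or.inr ⟨e, by simp, h⟩
      · exact Or.inr ⟨c, by simp [hc], hx⟩
    · rintro (h | ⟨c, hc, hx⟩)
      · exact Or.inl (Or.inl h)
      · rcases List.mem_cons.mp hc with rfl | hc
        · exact Or.inl (Or.inr hx)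
        · exact Or.inr ⟨c, hc, hx⟩

lemma pvDict_mem (drugs : List String) (q : String) (x : Int) :
    x ∈ (pvDict drugs).getD q [] ↔ ∃ (k : Nat), k < drugs.length ∧ x = (k : Int) ∧
      (q = PySem.Str.lower drugs[k]! ∨ q = PySem.Str.replace (PySem.Str.lower drugs[k]!) "-" "") := by
  unfold pvDict
  rw [pvDict_mem_aux]
  simp only [PySem.Dict.getD_empty, List.not_mem_nil, false_or]
  constructor
  · rintro ⟨e, he, hx⟩
    obtain ⟨k, hk, rfl⟩ := (PySem.List.mem_enumerate_iff _ _ _).mp he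
    refine ⟨k, hk, by simpa using hx.1, ?_⟩
    rw [getElem!_pos drugs k hk]
    exact hx.2
  · rintro ⟨k, hk, rfl, hq⟩
    refine ⟨((0 : Int) + (k : Int), drugs[k]), (PySem.List.mem_enumerate_iff _ _ _).mpr ⟨k, hk, rfl⟩, by simp, ?_⟩
    rwa [getElem!_pos drugs k hk] at hq

lemma mem_keys_of_mem_getD (d : PySem.Dict String (List Int)) (q : String) (x : Int)
    (h : x ∈ d.getD q []) : q ∈ d.keys := by
  by_contra hq
  have hc : d.contains q = false := by rw [PySem.Dict.contains_eq_decide_mem_keys]; simp [hq]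
  rw [PySem.Dict.getD_of_not_contains d [] hc] at h
  simp at h

-- any double-sided slice is an infix of the string
lemma slice_infix (t : String) (a b : Int) :
    (PySem.Str.slice t (some a) (some b)).toList <:+: t.toList := by
  simp only [PySem.Str.toList_slice, PySem.Chars.slice_eq_listSlice]
  simp only [PySem.List.slice]
  exact ((List.take_prefix _ _).isInfix).trans (List.drop_suffix _ _).isInfix

-- a pattern that is a key of the index occurs in t iff some scanned window equals it
lemma pattern_window (drugs : List String) (t p : String) (hp : p ∈ (pvDict drugs).keys)
    (h : p.toList <:+: t.toList) :
    ∃ L ∈ pvLens drugs, ∃ i ∈ PySem.List.pyRange 0 (PySem.Str.len t - L + 1) 1,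
      PySem.Str.slice t (some i) (some (i + L)) = p := by
  obtain ⟨pre, suf, hts⟩ := h
  rw [List.append_assoc] at hts
  refine ⟨PySem.Str.len p, ?_, (pre.length : Int), ?_, ?_⟩
  · unfold pvLens
    rw [PySem.List.mem_sorted, PySem.Set.mem_ofList]
    exact List.mem_map_of_mem hp
  · rw [PySem.List.mem_pyRange_one]
    have hlen : t.toList.length = pre.length + p.toList.length + suf.length := by
      rw [← hts]; simp; omega
    have hlt : PySem.Str.len t = (t.toList.length : Int) := by simp [PySem.Str.len_eq]
    have hlp : PySem.Str.len p = (p.toList.length : Int) := by simp [PySem.Str.len_eq]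
    rw [hlt, hlp]
    constructor
    · positivity
    · omega
  · apply String.toList_inj.mp
    have hlp : PySem.Str.len p = (p.toList.length : Int) := by simp [PySem.Str.len_eq]
    rw [hlp]
    simp only [PySem.Str.toList_slice, PySem.Chars.slice_eq_listSlice]
    rw [PySem.List.slice_natCast_add t.toList pre.length p.toList.length]
    rw [← hts]
    rw [List.drop_left, List.take_left]

lemma mem_pvMatched (drugs : List String) (t : String) (x : Int) :
    x ∈ pvMatched drugs t ↔ ∃ (k : Nat), k < drugs.length ∧ x = (k : Int) ∧ pvMatch drugs[k]! t = true := by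
  unfold pvMatched
  rw [pv_mem_foldl _ (fun L x => ∃ i ∈ PySem.List.pyRange 0 (PySem.Str.len t - L + 1) 1,
        x ∈ (pvDict drugs).getD (PySem.Str.slice t (some i) (some (i + L))) [])
      (fun s L x => by
        rw [pv_mem_foldl _ (fun i x =>
              x ∈ (pvDict drugs).getD (PySem.Str.slice t (some i) (some (i + L))) [])
            (fun s i x => by
              have := PySem.Set.mem_foldl_add
                ((pvDict drugs).getD (PySem.Str.slice t (some i) (some (i + L))) [])
                (fun (b : Int) => b) s x
              simpa using this)])]
  simp only [PySem.Set.empty, List.not_mem_nil, false_or]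
  constructor
  · rintro ⟨L, _, i, _, hx⟩
    obtain ⟨k, hk, rfl, hq⟩ := (pvDict_mem _ _ _).mp hx
    refine ⟨k, hk, rfl, ?_⟩
    have hinf := slice_infix t i (i + L)
    unfold pvMatch
    rcases hq with hq | hq <;> rw [hq] at hinf
    · rw [Bool.or_eq_true]
      exact Or.inl ((PySem.Str.isIn_iff_infix _ _).mpr hinf)
    · rw [Bool.or_eq_true]
      exact Or.inr ((PySem.Str.isIn_iff_infix _ _).mpr hinf)
  · rintro ⟨k, hk, rfl, hm⟩
    unfold pvMatch at hm
    rw [Bool.or_eq_true] at hm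
    rcases hm with hm | hm
    · have hkey : (k : Int) ∈ (pvDict drugs).getD (PySem.Str.lower drugs[k]!) [] :=
        (pvDict_mem _ _ _).mpr ⟨k, hk, rfl, Or.inl rfl⟩
      obtain ⟨L, hL, i, hi, hw⟩ := pattern_window drugs t _
        (mem_keys_of_mem_getD _ _ _ hkey) ((PySem.Str.isIn_iff_infix _ _).mp hm)
      exact ⟨L, hL, i, hi, by rw [hw]; exact hkey⟩
    · have hkey : (k : Int) ∈ (pvDict drugs).getD (PySem.Str.replace (PySem.Str.lower drugs[k]!) "-" "") [] :=
        (pvDict_mem _ _ _).mpr ⟨k, hk, rfl, Or.inr rfl⟩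
      obtain ⟨L, hL, i, hi, hw⟩ := pattern_window drugs t _
        (mem_keys_of_mem_getD _ _ _ hkey) ((PySem.Str.isIn_iff_infix _ _).mp hm)
      exact ⟨L, hL, i, hi, by rw [hw]; exact hkey⟩

lemma nodup_pvMatched (drugs : List String) (t : String) : (pvMatched drugs t).Nodup := by
  unfold pvMatched
  apply pv_nodup_foldl _ (fun s L hs => ?_) _ _ List.nodup_nil
  apply pv_nodup_foldl _ (fun s i hs => ?_) _ _ hs
  apply pv_nodup_foldl _ (fun s idx hs => PySem.Set.nodup_add _ _ hs) _ _ hs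

lemma sorted_pvMatched (drugs : List String) (t : String) :
    PySem.List.sorted (pvMatched drugs t) (fun x => x) false
      = (PySem.List.pyRange 0 (PySem.List.len drugs) 1).filter
          (fun k => pvMatch (PySem.List.pyGetD drugs k "") t) := by
  apply PySem.List.sorted_eq_of_perm_of_pairwise_lt
  · -- permutation: both Nodup with the same members
    apply (List.perm_ext_iff_of_nodup ?_ (nodup_pvMatched drugs t)).mpr
    · intro x
      rw [List.mem_filter, PySem.List.mem_pyRange_one, mem_pvMatched]
      simp only [PySem.List.len_eq]
      constructor
      · rintro ⟨⟨h0, h1⟩, hp⟩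
        have hlt : x.toNat < drugs.length := by omega
        refine ⟨x.toNat, hlt, by omega, ?_⟩
        rw [PySem.List.pyGetD_eq_getElem drugs "" h0 (by exact_mod_cast h1)] at hp
        rw [getElem!_pos drugs x.toNat hlt]
        exact hp
      · rintro ⟨k, hk, rfl, hp⟩
        refine ⟨⟨by positivity, by exact_mod_cast hk⟩, ?_⟩
        rw [PySem.List.pyGetD_eq_getElem drugs "" (by positivity) (by exact_mod_cast hk)]
        rw [getElem!_pos drugs k hk] at hp
        exact hp
    · -- the filtered range is Nodup since it is Pairwise (<)
      have hpw : ((PySem.List.pyRange 0 (PySem.List.len drugs) 1).filter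
          (fun k => pvMatch (PySem.List.pyGetD drugs k "") t)).Pairwise (· < ·) := by
        apply List.Pairwise.filter
        rw [PySem.List.pyRange_one]
        exact List.pairwise_lt_range.map _ (fun h => by omega)
      exact hpw.imp (fun h => ne_of_lt h)
  · -- strictly increasing
    apply List.Pairwise.filter
    rw [PySem.List.pyRange_one]
    exact List.pairwise_lt_range.map _ (fun h => by omega)

lemma map_filter_comm {α β : Type} (l : List α) (f : α → β) (p : β → Bool) :
    (l.filter (fun x => p (f x))).map f = (l.map f).filter p := by
  induction l with
  | nil => rfl
  | cons a l ih => by_cases h : p (f a) <;> simp [h, ih]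

lemma map_get_filter (drugs : List String) (p : String → Bool) :
    ((PySem.List.pyRange 0 (PySem.List.len drugs) 1).filter
        (fun k => p (PySem.List.pyGetD drugs k ""))).map (fun k => PySem.List.pyGetD drugs k "")
      = drugs.filter p := by
  rw [map_filter_comm, PySem.List.map_pyGetD_pyRange_zero]

-- the per-item steps of the two programs act identically on any dict
lemma step_eq (drugs : List String) (item : List (String × String))
    (r : PySem.Dict String (List (List (String × String)))) :
    (PySem.List.sorted (pvMatched drugs (pvTL item)) (fun x => x) false).foldl
        (fun r idx => r.modify (PySem.List.pyGetD drugs idx "") [] (fun l => l ++ [item])) r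
      = drugs.foldl (fun dn g => if pvMatch g (pvTL item)
          then dn.modify g [] (fun l => l ++ [item]) else dn) r := by
  rw [sorted_pvMatched]
  rw [show ((PySem.List.pyRange 0 (PySem.List.len drugs) 1).filter
        (fun k => pvMatch (PySem.List.pyGetD drugs k "") (pvTL item))).foldl
        (fun r idx => r.modify (PySem.List.pyGetD drugs idx "") [] (fun l => l ++ [item])) r
      = (((PySem.List.pyRange 0 (PySem.List.len drugs) 1).filter
          (fun k => pvMatch (PySem.List.pyGetD drugs k "") (pvTL item))).map
          (fun k => PySem.List.pyGetD drugs k "")).foldl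
          (fun r g => r.modify g [] (fun l => l ++ [item])) r from (List.foldl_map (f := fun k => PySem.List.pyGetD drugs k "") (g := fun (r : PySem.Dict String (List (List (String × String)))) g => r.modify g [] (fun l => l ++ [item]))).symm]
  rw [map_get_filter drugs (fun g => pvMatch g (pvTL item))]
  exact List.foldl_filter

-- ===== VERDICT (by name: the statement is the Claim_ definition above) =====
theorem extract_drug_mentions_spec : Claim_equal_extract_drug_mentions := by
  intro news drugs _
  unfold Spec_extract_drug_mentions extract_drug_mentions extract_drug_mentions_alt
  change (news.foldl (fun dn item =>
      drugs.foldl (fun dn g => if pvMatch g (pvTL item)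
        then dn.modify g [] (fun l => l ++ [item]) else dn) dn)
      (drugs.foldl (fun (d : PySem.Dict String (List (List (String × String)))) drug =>
        d.insert drug []) PySem.Dict.empty)).items
    = (news.foldl (fun r item =>
      (PySem.List.sorted (pvMatched drugs (pvTL item)) (fun x => x) false).foldl
        (fun r idx => r.modify (PySem.List.pyGetD drugs idx "") [] (fun l => l ++ [item])) r)
      (drugs.foldl (fun (d : PySem.Dict String (List (List (String × String)))) drug =>
        d.insert drug []) PySem.Dict.empty)).items
  congr 1
  apply congrArg (fun f => List.foldl f _ news)
  funext r item
  exact (step_eq drugs item r).symm
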